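-- pv_equiv track=rewrite | github.com/quanfbi2003/Webshell-Scan | webshell-scan-upgrader/upgrader.py | comment_rule_with_slash
-- ===== SOURCE A (Python) =====
-- def comment_rule_with_slash(rule_text):
--     """
--     Comment toàn bộ rule bằng cách thêm // vào đầu mỗi dòng
--
--     Args:
--         rule_text: Nội dung rule cần comment
--
--     Returns:
--         Rule đã được comment bằng // ở đầu mỗi dòng
--     """
--     if not rule_text.strip():
--         return rule_text
--
--     lines = rule_text.split('\n')
--     commented_lines = []
--     for line in lines:
--         if line.strip():  # Chỉ comment dòng không rỗng
--             commented_lines.append('//' + line)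
--         else:  # Giữ nguyên dòng rỗng
--             commented_lines.append(line)
--
--     return '\n'.join(commented_lines)
-- ===== SOURCE B (Python) =====
-- def comment_rule_with_slash(rule_text):
--     """Single character-level pass (a small state machine): buffer the leading
--     whitespace of each line; on the line's first non-space char emit '//', the
--     buffered whitespace and the char, then copy the rest of the line verbatim;
--     on '\n' flush the buffer. Blank lines never trigger the marker, so they
--     (and all-whitespace input) pass through unchanged."""
--     out = []
--     buf = []            # leading whitespace of the current line, not yet emitted
--     marked = False      # '//' already emitted for the current line
--     for ch in rule_text:
--         if ch == '\n':
--             out += buf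
--             buf = []
--             out.append('\n')
--             marked = False
--         elif marked:
--             out.append(ch)
--         elif ch.isspace():
--             buf.append(ch)
--         else:
--             out.append('//')
--             out += buf
--             buf = []
--             out.append(ch)
--             marked = True
--     out += buf
--     return ''.join(out)
-- ===== Notes on version B (the rewrite author's own statement) =====
-- stated objective: alternative
-- what changed: Replaces split-into-lines / per-line strip test / map / join (plus a whole-text all-whitespace guard) with a single character-level state machine that buffers each line's leading whitespace and emits '//' the moment a line's first non-space character is seen; no line list or per-line strip is ever built, and the guard is unnecessary because blank lines never trigger the marker.
import Mathlib
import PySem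

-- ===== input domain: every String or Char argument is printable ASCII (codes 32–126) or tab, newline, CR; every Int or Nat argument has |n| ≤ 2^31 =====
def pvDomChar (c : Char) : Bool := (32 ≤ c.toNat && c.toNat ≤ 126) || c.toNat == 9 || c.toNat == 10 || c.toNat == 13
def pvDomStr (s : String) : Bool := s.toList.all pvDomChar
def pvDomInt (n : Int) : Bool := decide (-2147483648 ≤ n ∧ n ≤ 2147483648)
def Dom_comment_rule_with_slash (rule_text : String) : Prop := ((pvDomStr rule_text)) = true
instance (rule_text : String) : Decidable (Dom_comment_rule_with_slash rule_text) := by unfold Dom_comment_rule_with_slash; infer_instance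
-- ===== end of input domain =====

-- B replaces split/map/join with one character-level state machine; same value everywhere.

-- ===== PORT A =====
-- literal port of A: guard on the stripped whole text, split on '\n', map each line, join with '\n'
def comment_rule_with_slash (rule_text : String) : String :=
  if PySem.Chars.strip rule_text.toList = [] then rule_text
  else
    let lines := PySem.Chars.splitOn rule_text.toList ['\n']
    let commented_lines := lines.map (fun line =>
      if PySem.Chars.strip line ≠ [] then '/' :: '/' :: line else line)
    String.ofList (PySem.Chars.join ['\n'] commented_lines)

-- ===== PORT B =====
-- port of Source B's for-loop body: state = (out, buf, marked); one step per character
def pvStep (st : List Char × List Char × Bool) (ch : Char) : List Char × List Char × Bool :=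
  if ch = '\n' then (st.1 ++ st.2.1 ++ ['\n'], [], false)
  else if st.2.2 then (st.1 ++ [ch], st.2.1, st.2.2)
  else if PySem.Chars.isspace ch then (st.1, st.2.1 ++ [ch], st.2.2)
  else (st.1 ++ '/' :: '/' :: st.2.1 ++ [ch], [], true)

def comment_rule_with_slash_alt (rule_text : String) : String :=
  let st := rule_text.toList.foldl pvStep ([], [], false)
  String.ofList (st.1 ++ st.2.1)

-- ===== PRECONDITION & SPEC =====
def Spec_comment_rule_with_slash (rule_text : String) (out : String) : Prop := out = comment_rule_with_slash_alt rule_text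
instance (rule_text : String) (out : String) : Decidable (Spec_comment_rule_with_slash rule_text out) := by unfold Spec_comment_rule_with_slash; infer_instance

-- ===== CLAIM (what is proved, stated in full; the proofs are below) =====
def Claim_equal_comment_rule_with_slash : Prop := ∀ (rule_text : String), Dom_comment_rule_with_slash rule_text → Spec_comment_rule_with_slash rule_text (comment_rule_with_slash rule_text)

-- ===== LEMMAS AND PROOFS =====

-- the per-line transform A applies
def pvF (line : List Char) : List Char :=
  if PySem.Chars.strip line ≠ [] then '/' :: '/' :: line else line

-- structural model of Python's  s.split('\n')
def pvSplit : List Char → List (List Char)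
  | [] => [[]]
  | c :: r => if c = '\n' then [] :: pvSplit r else (pvSplit r).modifyHead (c :: ·)

theorem pvGo_spec (l : List Char) : ∀ (fuel : Nat) (cur : List Char) (acc : List (List Char)),
    l.length < fuel →
    PySem.Chars.splitOn.go ['\n'] fuel l cur acc
      = acc.reverse ++ (pvSplit l).modifyHead (cur.reverse ++ ·) := by
  induction l with
  | nil =>
    intro fuel cur acc h
    cases fuel with
    | zero => omega
    | succ f => simp [PySem.Chars.splitOn.go, pvSplit]
  | cons c r ih =>
    intro fuel cur acc h
    cases fuel with
    | zero => omega
    | succ f =>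
      rw [PySem.Chars.splitOn.go]
      simp only [List.length_cons] at h
      by_cases hc : c = '\n'
      · subst hc
        have hp : List.isPrefixOf ['\n'] ('\n' :: r) = true := by simp [List.isPrefixOf]
        simp only [hp, if_pos, List.length_singleton, List.drop_one, List.tail_cons]
        rw [ih f [] (cur.reverse :: acc) (by omega)]
        cases hs : pvSplit r <;> simp [pvSplit, hs]
      · have hp : List.isPrefixOf ['\n'] (c :: r) = false := by
          simp [List.isPrefixOf]
          exact fun h => absurd h.symm hc
        simp only [hp, Bool.false_eq_true, if_false]
        rw [ih f (c :: cur) acc (by omega)]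
        simp only [pvSplit, if_neg hc, List.reverse_cons]
        cases hs : pvSplit r with
        | nil => simp
        | cons a t => simp

theorem pvSplitOn_eq (cs : List Char) : PySem.Chars.splitOn cs ['\n'] = pvSplit cs := by
  rw [PySem.Chars.splitOn, pvGo_spec cs (cs.length+1) [] [] (by omega)]
  cases hs : pvSplit cs with
  | nil => simp
  | cons a t => simp

theorem pvSplit_decomp (cs : List Char) :
    pvSplit cs = cs.takeWhile (fun c => c ≠ '\n') ::
      (match cs.dropWhile (fun c => c ≠ '\n') with
       | [] => []
       | _ :: r => pvSplit r) := by
  induction cs with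
  | nil => simp [pvSplit]
  | cons c r ih =>
    by_cases hc : c = '\n'
    · subst hc; simp [pvSplit]
    · simp only [pvSplit, if_neg hc, List.takeWhile_cons, List.dropWhile_cons, ne_eq,
        decide_not]
      rw [ih]
      simp [hc]

theorem pvSplit_ne_nil (cs : List Char) : pvSplit cs ≠ [] := by
  cases cs with
  | nil => simp [pvSplit]
  | cons c r =>
    simp only [pvSplit]
    split
    · simp
    · cases h : pvSplit r with
      | nil => exact absurd h (pvSplit_ne_nil r)
      | cons a t => simp

theorem pvStrip_nil_iff (cs : List Char) :
    PySem.Chars.strip cs = [] ↔ ∀ c ∈ cs, PySem.Chars.isspace c := by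
  constructor
  · intro h c hc
    simp only [PySem.Chars.strip, PySem.Chars.rstrip, PySem.Chars.lstrip,
      List.reverse_eq_nil_iff, List.dropWhile_eq_nil_iff, List.mem_reverse] at h
    rcases List.mem_append.mp
      ((List.takeWhile_append_dropWhile (p := PySem.Chars.isspace) (l := cs)) ▸ hc) with h1 | h1
    · exact List.mem_takeWhile_imp h1
    · exact h c h1
  · intro h
    simp only [PySem.Chars.strip, PySem.Chars.rstrip, PySem.Chars.lstrip,
      List.reverse_eq_nil_iff, List.dropWhile_eq_nil_iff, List.mem_reverse]
    intro c hc
    exact h c ((List.dropWhile_sublist _).mem hc)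

-- once the current line is marked, the machine copies characters verbatim
theorem pvRun_marked (l : List Char) : ∀ (out buf : List Char), (∀ c ∈ l, c ≠ '\n') →
    l.foldl pvStep (out, buf, true) = (out ++ l, buf, true) := by
  induction l with
  | nil => intro out buf _; simp
  | cons c r ih =>
    intro out buf h
    have hc : c ≠ '\n' := h c (by simp)
    simp only [List.foldl_cons, pvStep, if_neg hc, if_pos]
    rw [ih (out ++ [c]) buf (fun x hx => h x (by simp [hx]))]
    simp

-- running an unmarked machine over a newline-free line
theorem pvRun_false (l : List Char) : ∀ (out buf : List Char), (∀ c ∈ l, c ≠ '\n') →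
    l.foldl pvStep (out, buf, false) =
      if ∀ c ∈ l, PySem.Chars.isspace c then (out, buf ++ l, false)
      else (out ++ '/' :: '/' :: buf ++ l, [], true) := by
  induction l with
  | nil => intro out buf _; simp
  | cons c r ih =>
    intro out buf h
    have hc : c ≠ '\n' := h c (by simp)
    by_cases hs : PySem.Chars.isspace c
    · simp only [List.foldl_cons, pvStep, if_neg hc, if_pos hs, Bool.false_eq_true, if_false]
      rw [ih out (buf ++ [c]) (fun x hx => h x (by simp [hx]))]
      by_cases hall : ∀ x ∈ r, PySem.Chars.isspace x
      · rw [if_pos hall, if_pos (by simpa [hs] using hall)]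
        simp
      · rw [if_neg hall,
          if_neg (fun hh => hall (fun x hx => hh x (List.mem_cons_of_mem _ hx)))]
        simp
    · simp only [List.foldl_cons, pvStep, if_neg hc, if_neg hs, Bool.false_eq_true, if_false]
      rw [pvRun_marked r _ _ (fun x hx => h x (by simp [hx]))]
      rw [if_neg (by intro hh; exact hs (hh c (by simp)))]
      simp

-- the machine's final flush equals A's join of the per-line transforms
theorem pvRun_join (cs : List Char) : ∀ out : List Char,
    (cs.foldl pvStep (out, [], false)).1 ++ (cs.foldl pvStep (out, [], false)).2.1
      = out ++ PySem.Chars.join ['\n'] ((pvSplit cs).map pvF) := by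
  induction hn : cs.length using Nat.strong_induction_on generalizing cs with
  | _ n ih =>
  intro out
  rw [pvSplit_decomp cs]
  set t := cs.takeWhile (fun c => c ≠ '\n') with ht
  have htk : ∀ c ∈ t, c ≠ '\n' := by
    intro c hc; rw [ht] at hc; simpa using List.mem_takeWhile_imp hc
  cases hd : cs.dropWhile (fun c => c ≠ '\n') with
  | nil =>
    have hcs : cs = t := by
      conv_lhs => rw [← List.takeWhile_append_dropWhile (p := fun c => decide (c ≠ '\n')) (l := cs)]
      rw [hd]; simp [ht]
    rw [hcs, pvRun_false _ out [] htk]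
    simp only [List.map_cons, List.map_nil, PySem.Chars.join_singleton]
    by_cases hall : ∀ c ∈ t, PySem.Chars.isspace c
    · rw [if_pos hall]
      simp [pvF, (pvStrip_nil_iff _).mpr hall]
    · rw [if_neg hall]
      have hne : PySem.Chars.strip t ≠ [] := by
        intro h; exact hall ((pvStrip_nil_iff _).mp h)
      simp [pvF, hne]
  | cons x r =>
    have hx : x = '\n' := by
      have hne : List.dropWhile (fun c => decide (c ≠ '\n')) cs ≠ [] := by rw [hd]; simp
      have h := List.head_dropWhile_not (fun c => decide (c ≠ '\n')) hne
      have hh : (List.dropWhile (fun c => decide (c ≠ '\n')) cs).head hne = x := by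
        simp only [hd, List.head_cons]
      rw [hh] at h; simpa using h
    have hcs : cs = t ++ '\n' :: r := by
      have h2 := List.takeWhile_append_dropWhile (p := fun c => decide (c ≠ '\n')) (l := cs)
      rw [hd, hx] at h2
      rw [ht]; exact h2.symm
    rw [hcs, List.foldl_append, pvRun_false _ out [] htk,
      List.foldl_cons]
    have hstep : ∀ st : List Char × List Char × Bool,
        pvStep st '\n' = (st.1 ++ st.2.1 ++ ['\n'], [], false) := by
      intro st; simp [pvStep]
    have hlen : r.length < cs.length := by
      have h1 : (cs.dropWhile (fun c => c ≠ '\n')).length ≤ cs.length :=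
        (List.dropWhile_sublist _).length_le
      rw [hd] at h1; simp at h1; omega
    have hrec := ih r.length (by omega) r rfl
    by_cases hall : ∀ c ∈ t, PySem.Chars.isspace c
    · rw [if_pos hall, hstep, hrec]
      cases hs : pvSplit r with
      | nil => exact absurd hs (pvSplit_ne_nil r)
      | cons a u =>
        simp only [hs, List.map_cons]
        rw [PySem.Chars.join_cons_cons]
        simp [pvF, (pvStrip_nil_iff _).mpr hall]
    · rw [if_neg hall, hstep, hrec]
      have hne : PySem.Chars.strip t ≠ [] := by
        intro h; exact hall ((pvStrip_nil_iff _).mp h)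
      cases hs : pvSplit r with
      | nil => exact absurd hs (pvSplit_ne_nil r)
      | cons a u =>
        simp only [hs, List.map_cons]
        rw [PySem.Chars.join_cons_cons]
        simp [pvF, hne]

-- on all-whitespace input the machine is the identity (A's guard case)
theorem pvRun_space (cs : List Char) (hsp : ∀ c ∈ cs, PySem.Chars.isspace c) :
    ∀ out buf : List Char,
      (cs.foldl pvStep (out, buf, false)).1 ++ (cs.foldl pvStep (out, buf, false)).2.1
        = out ++ buf ++ cs := by
  induction cs with
  | nil => intro out buf; simp
  | cons c r ih =>
    intro out buf
    have hc : PySem.Chars.isspace c := hsp c (by simp)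
    by_cases hn : c = '\n'
    · subst hn
      simp only [List.foldl_cons, pvStep, if_pos]
      rw [ih (fun x hx => hsp x (by simp [hx])) _ []]
      simp
    · simp only [List.foldl_cons, pvStep, if_neg hn, if_pos hc, Bool.false_eq_true, if_false]
      rw [ih (fun x hx => hsp x (by simp [hx])) out (buf ++ [c])]
      simp

-- ===== VERDICT (by name: the statement is the Claim_ definition above) =====
theorem comment_rule_with_slash_spec : Claim_equal_comment_rule_with_slash := by
  intro s _
  unfold Spec_comment_rule_with_slash comment_rule_with_slash comment_rule_with_slash_alt
  split
  · next h =>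
    show s = String.ofList ((s.toList.foldl pvStep ([], [], false)).1
      ++ (s.toList.foldl pvStep ([], [], false)).2.1)
    rw [pvRun_space s.toList ((pvStrip_nil_iff _).mp h) [] []]
    simp
  · show _ = String.ofList ((s.toList.foldl pvStep ([], [], false)).1
      ++ (s.toList.foldl pvStep ([], [], false)).2.1)
    rw [pvRun_join, pvSplitOn_eq]
    rfl
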